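-- pv_equiv track=rewrite | github.com/Hung-3008/KGChat-03 | backend/node_extractor/umls_hierarchy.py | filter_entities_by_hierarchy
-- ===== SOURCE A (Python) =====
-- from typing import Dict, List, Optional, Tuple
--
-- def normalize_entity(entity: str) -> str:
--     """Normalize an entity string for comparison."""
--     return entity.strip().lower()
--
-- def filter_entities_by_hierarchy(
--     extracted_entities: Dict[str, Dict[str, List[str]]],
--     hierarchy_tree: Dict[str, Dict[str, int]]
-- ) -> Dict[str, Dict[str, List[str]]]:
--     """
--     Keep, for each entity, the semantic type(s) with the maximum depth.
--     If multiple types share the same maximum depth, return all of them.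
--     """
--     entity_mapping: Dict[str, List[Dict]] = {}
--
--     for cluster_name, cluster_data in extracted_entities.items():
--         for semantic_type, entities in cluster_data.items():
--             depth = hierarchy_tree.get(cluster_name, {}).get(semantic_type, 0)
--             for entity in entities:
--                 normalized = normalize_entity(entity)
--                 entity_mapping.setdefault(normalized, []).append({
--                     "original_entity": entity,
--                     "semantic_type": semantic_type,
--                     "cluster": cluster_name,
--                     "depth": depth
--                 })
--
--     best_semantic_types: Dict[str, Optional[Dict]] = {}
--     for ent, types in entity_mapping.items():
--         if len(types) == 1:
--             best_semantic_types[ent] = types[0]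
--         else:
--             sorted_types = sorted(types, key=lambda x: x["depth"], reverse=True)
--             max_depth = sorted_types[0]["depth"]
--             max_depth_types = [t for t in sorted_types if t["depth"] == max_depth]
--             best_semantic_types[ent] = max_depth_types[0] if len(max_depth_types) == 1 else None
--
--     filtered_entities: Dict[str, Dict[str, List[str]]] = {c: {} for c in extracted_entities.keys()}
--
--     for ent, best in best_semantic_types.items():
--         if best is None:
--             max_depth = max(t["depth"] for t in entity_mapping[ent])
--             max_depth_types = [t for t in entity_mapping[ent] if t["depth"] == max_depth]
--             for type_info in max_depth_types:
--                 cluster = type_info["cluster"]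
--                 semantic_type = type_info["semantic_type"]
--                 original_entity = type_info["original_entity"]
--                 filtered_entities.setdefault(cluster, {}).setdefault(semantic_type, [])
--                 if original_entity not in filtered_entities[cluster][semantic_type]:
--                     filtered_entities[cluster][semantic_type].append(original_entity)
--         else:
--             cluster = best["cluster"]
--             semantic_type = best["semantic_type"]
--             original_entity = best["original_entity"]
--             filtered_entities.setdefault(cluster, {}).setdefault(semantic_type, [])
--             if original_entity not in filtered_entities[cluster][semantic_type]:
--                 filtered_entities[cluster][semantic_type].append(original_entity)
--
--     return filtered_entities
-- ===== SOURCE B (Python) =====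
-- from typing import Dict, List, Tuple
--
-- def normalize_entity(entity: str) -> str:
--     return entity.strip().lower()
--
-- def filter_entities_by_hierarchy(
--     extracted_entities: Dict[str, Dict[str, List[str]]],
--     hierarchy_tree: Dict[str, Dict[str, int]]
-- ) -> Dict[str, Dict[str, List[str]]]:
--     # Single pass: per normalized entity keep (running max depth, candidates tied at it).
--     best: Dict[str, Tuple[int, List[Tuple[str, str, str]]]] = {}
--     for cluster_name, cluster_data in extracted_entities.items():
--         for semantic_type, entities in cluster_data.items():
--             depth = hierarchy_tree.get(cluster_name, {}).get(semantic_type, 0)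
--             for entity in entities:
--                 n = normalize_entity(entity)
--                 cand = (entity, semantic_type, cluster_name)
--                 cur = best.get(n)
--                 if cur is None or depth > cur[0]:
--                     best[n] = (depth, [cand])
--                 elif depth == cur[0]:
--                     cur[1].append(cand)
--
--     filtered: Dict[str, Dict[str, List[str]]] = {c: {} for c in extracted_entities}
--     for _n, (_d, cands) in best.items():
--         for original_entity, semantic_type, cluster in cands:
--             bucket = filtered.setdefault(cluster, {}).setdefault(semantic_type, [])
--             if original_entity not in bucket:
--                 bucket.append(original_entity)
--     return filtered
-- ===== Notes on version B (the rewrite author's own statement) =====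
-- stated objective: simpler
-- what changed: Replaces A's full candidate table plus stable-sort/two-phase best-or-None selection with a single pass that keeps, per normalized entity, only the running maximum depth and the candidates tied at it, then emits them directly.
import Mathlib
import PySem

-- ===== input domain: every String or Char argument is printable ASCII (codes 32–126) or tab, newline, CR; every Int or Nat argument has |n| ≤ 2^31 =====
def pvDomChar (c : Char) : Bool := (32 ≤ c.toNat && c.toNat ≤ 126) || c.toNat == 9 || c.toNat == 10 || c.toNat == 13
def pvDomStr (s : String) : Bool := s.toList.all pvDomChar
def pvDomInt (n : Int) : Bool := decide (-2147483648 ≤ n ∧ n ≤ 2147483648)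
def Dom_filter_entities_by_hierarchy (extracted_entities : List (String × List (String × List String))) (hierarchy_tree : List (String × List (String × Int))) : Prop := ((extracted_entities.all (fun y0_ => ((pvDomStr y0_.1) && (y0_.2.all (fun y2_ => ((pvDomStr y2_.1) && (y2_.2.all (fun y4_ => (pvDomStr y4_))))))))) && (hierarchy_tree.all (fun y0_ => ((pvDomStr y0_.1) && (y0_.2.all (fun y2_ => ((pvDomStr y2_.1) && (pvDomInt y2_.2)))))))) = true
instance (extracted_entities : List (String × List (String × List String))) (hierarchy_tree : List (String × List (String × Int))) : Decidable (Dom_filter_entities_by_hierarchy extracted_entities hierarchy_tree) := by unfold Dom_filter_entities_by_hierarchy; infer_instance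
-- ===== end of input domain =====

-- B replaces A's full candidate table + stable-sort/two-phase best-or-None selection by a single
-- pass that keeps, per normalized entity, only the running maximum depth and the candidates tied
-- at it (objective: simpler; same observable return value).

-- shared module-level helper (normalize_entity in the Python module, used by both versions)
def normalize_entity (entity : String) : String := PySem.Str.lower (PySem.Str.strip entity)

-- transliteration of `hierarchy_tree.get(cluster_name, {}).get(semantic_type, 0)` (appears verbatim in both versions)
def pvDepthOf (hierarchy_tree : List (String × List (String × Int))) (cluster semantic : String) : Int :=
  (PySem.Dict.mk ((PySem.Dict.mk hierarchy_tree).getD cluster [])).getD semantic 0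

-- ===== PORT A =====

-- one iteration of A's innermost loop: entity_mapping.setdefault(normalized, []).append({...})
def pvStepA (em : PySem.Dict String (List (String × String × String × Int)))
    (depth : Int) (semantic cluster entity : String) :
    PySem.Dict String (List (String × String × String × Int)) :=
  let n := normalize_entity entity
  em.insert n (em.getD n [] ++ [(entity, semantic, cluster, depth)])

-- A's per-entity best selection (the body of the second loop)
def pvBestA (types : List (String × String × String × Int)) : Option (String × String × String × Int) :=
  if types.length == 1 then types.head?
  else
    let sorted_types := PySem.List.sorted types (fun t => t.2.2.2) true
    let max_depth := ((sorted_types.head?).map (fun t => t.2.2.2)).getD 0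
    let max_depth_types := sorted_types.filter (fun t => t.2.2.2 == max_depth)
    if max_depth_types.length == 1 then max_depth_types.head? else none

-- the setdefault/setdefault/membership/append block of A's third loop
def pvEmitA (f : PySem.Dict String (PySem.Dict String (List String)))
    (t : String × String × String × Int) : PySem.Dict String (PySem.Dict String (List String)) :=
  let f1 := f.setdefault t.2.2.1 PySem.Dict.empty
  let inner := (f1.getD t.2.2.1 PySem.Dict.empty).setdefault t.2.1 []
  let lst := inner.getD t.2.1 []
  let inner' := if lst.contains t.1 then inner else inner.insert t.2.1 (lst ++ [t.1])
  f1.insert t.2.2.1 inner'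

def filter_entities_by_hierarchy (extracted_entities : List (String × List (String × List String))) (hierarchy_tree : List (String × List (String × Int))) : List (String × List (String × List String)) :=
  let em : PySem.Dict String (List (String × String × String × Int)) :=
    extracted_entities.foldl (fun em cl =>
      cl.2.foldl (fun em te =>
        let depth := pvDepthOf hierarchy_tree cl.1 te.1
        te.2.foldl (fun em e => pvStepA em depth te.1 cl.1 e) em) em) PySem.Dict.empty
  let best : PySem.Dict String (Option (String × String × String × Int)) :=
    em.items.foldl (fun b p => b.insert p.1 (pvBestA p.2)) PySem.Dict.empty
  let init := extracted_entities.foldl (fun d cl => d.insert cl.1 PySem.Dict.empty) PySem.Dict.empty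
  let fin := best.items.foldl (fun f p =>
    match p.2 with
    | some t => pvEmitA f t
    | none =>
      let types := em.getD p.1 []
      let max_depth := (PySem.List.max? (types.map (fun t => t.2.2.2)) (fun x => x)).getD 0
      (types.filter (fun t => t.2.2.2 == max_depth)).foldl pvEmitA f) init
  fin.items.map (fun p => (p.1, p.2.items))

-- ===== PORT B =====

-- one iteration of B's innermost loop: keep the running max depth and the tied candidates
def pvStepB (b : PySem.Dict String (Int × List (String × String × String)))
    (depth : Int) (semantic cluster entity : String) :
    PySem.Dict String (Int × List (String × String × String)) :=
  let n := normalize_entity entity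
  let cand := (entity, semantic, cluster)
  match b.get? n with
  | none => b.insert n (depth, [cand])
  | some cur =>
    if decide (cur.1 < depth) then b.insert n (depth, [cand])
    else if depth == cur.1 then b.insert n (cur.1, cur.2 ++ [cand])
    else b

-- B's bucket = filtered.setdefault(cluster, {}).setdefault(semantic_type, []); dedup append
def pvEmitB (f : PySem.Dict String (PySem.Dict String (List String)))
    (t : String × String × String) : PySem.Dict String (PySem.Dict String (List String)) :=
  let f1 := f.setdefault t.2.2 PySem.Dict.empty
  let inner := (f1.getD t.2.2 PySem.Dict.empty).setdefault t.2.1 []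
  let lst := inner.getD t.2.1 []
  let inner' := if lst.contains t.1 then inner else inner.insert t.2.1 (lst ++ [t.1])
  f1.insert t.2.2 inner'

def filter_entities_by_hierarchy_alt (extracted_entities : List (String × List (String × List String))) (hierarchy_tree : List (String × List (String × Int))) : List (String × List (String × List String)) :=
  let best : PySem.Dict String (Int × List (String × String × String)) :=
    extracted_entities.foldl (fun b cl =>
      cl.2.foldl (fun b te =>
        let depth := pvDepthOf hierarchy_tree cl.1 te.1
        te.2.foldl (fun b e => pvStepB b depth te.1 cl.1 e) b) b) PySem.Dict.empty
  let init := extracted_entities.foldl (fun d cl => d.insert cl.1 PySem.Dict.empty) PySem.Dict.empty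
  let fin := best.items.foldl (fun f p => p.2.2.foldl pvEmitB f) init
  fin.items.map (fun p => (p.1, p.2.items))

-- ===== PRECONDITION & SPEC =====
def Spec_filter_entities_by_hierarchy (extracted_entities : List (String × List (String × List String))) (hierarchy_tree : List (String × List (String × Int))) (out : List (String × List (String × List String))) : Prop := out = filter_entities_by_hierarchy_alt extracted_entities hierarchy_tree
instance (extracted_entities : List (String × List (String × List String))) (hierarchy_tree : List (String × List (String × Int))) (out : List (String × List (String × List String))) : Decidable (Spec_filter_entities_by_hierarchy extracted_entities hierarchy_tree out) := by unfold Spec_filter_entities_by_hierarchy; infer_instance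

-- ===== CLAIM (what is proved, stated in full; the proofs are below) =====
def Claim_equal_filter_entities_by_hierarchy : Prop := ∀ (extracted_entities : List (String × List (String × List String))) (hierarchy_tree : List (String × List (String × Int))), Dom_filter_entities_by_hierarchy extracted_entities hierarchy_tree → Spec_filter_entities_by_hierarchy extracted_entities hierarchy_tree (filter_entities_by_hierarchy extracted_entities hierarchy_tree)

-- ===== LEMMAS AND PROOFS =====

-- max depth of a candidate list, as B maintains it
def pvDmax : List (String × String × String × Int) → Int
  | [] => 0
  | c :: t => t.foldl (fun m x => max m x.2.2.2) c.2.2.2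

def pvStrip (c : String × String × String × Int) : String × String × String := (c.1, c.2.1, c.2.2.1)

-- the abstraction: B's per-entity state as a function of A's full candidate list
def pvG (l : List (String × String × String × Int)) : Int × List (String × String × String) :=
  (pvDmax l, (l.filter (fun c => c.2.2.2 == pvDmax l)).map pvStrip)

def pvKG (p : String × List (String × String × String × Int)) : String × (Int × List (String × String × String)) :=
  (p.1, pvG p.2)

def pvInv (em : PySem.Dict String (List (String × String × String × Int)))
    (b : PySem.Dict String (Int × List (String × String × String))) : Prop :=
  b.items = em.items.map pvKG ∧ em.keys.Nodup ∧ ∀ p ∈ em.items, p.2 ≠ []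

theorem pv_le_foldl (t : List (String × String × String × Int)) (a : Int) :
    a ≤ t.foldl (fun m x => max m x.2.2.2) a := by
  induction t generalizing a with
  | nil => simp
  | cons x t ih => exact le_trans (le_max_left _ _) (ih _)

theorem pv_mem_le_foldl (t : List (String × String × String × Int)) :
    ∀ (a : Int) (x : String × String × String × Int), x ∈ t →
      x.2.2.2 ≤ t.foldl (fun m x => max m x.2.2.2) a := by
  induction t with
  | nil => intro a x hx; cases hx
  | cons y t ih =>
    intro a x hx
    rcases List.mem_cons.mp hx with hx | hx
    · subst hx; exact le_trans (le_max_right _ _) (pv_le_foldl _ _)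
    · exact ih _ _ hx

theorem pv_le_pvDmax (l : List (String × String × String × Int))
    (x : String × String × String × Int) (hx : x ∈ l) : x.2.2.2 ≤ pvDmax l := by
  cases l with
  | nil => cases hx
  | cons c t =>
    rcases List.mem_cons.mp hx with hx | hx
    · subst hx; exact pv_le_foldl _ _
    · exact pv_mem_le_foldl _ _ _ hx

theorem pv_foldl_attained (t : List (String × String × String × Int)) (a : Int) :
    t.foldl (fun m x => max m x.2.2.2) a = a ∨
      ∃ x ∈ t, t.foldl (fun m x => max m x.2.2.2) a = x.2.2.2 := by
  induction t generalizing a with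
  | nil => exact Or.inl rfl
  | cons y t ih =>
    rcases ih (max a y.2.2.2) with h | ⟨x, hx, h⟩
    · rcases le_total a y.2.2.2 with hle | hle
      · exact Or.inr ⟨y, List.mem_cons_self .., by simp only [List.foldl_cons]; rw [h]; omega⟩
      · exact Or.inl (by simp only [List.foldl_cons]; rw [h]; omega)
    · exact Or.inr ⟨x, List.mem_cons_of_mem _ hx, by simp only [List.foldl_cons]; exact h⟩

theorem pv_dmax_attained (l : List (String × String × String × Int)) (hne : l ≠ []) :
    ∃ x ∈ l, x.2.2.2 = pvDmax l := by
  cases l with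
  | nil => exact absurd rfl hne
  | cons c t =>
    rcases pv_foldl_attained t c.2.2.2 with h | ⟨x, hx, h⟩
    · exact ⟨c, List.mem_cons_self .., by simp [pvDmax, h]⟩
    · exact ⟨x, List.mem_cons_of_mem _ hx, by simp [pvDmax, h]⟩

theorem pv_dmax_append (l : List (String × String × String × Int)) (hne : l ≠ [])
    (c : String × String × String × Int) :
    pvDmax (l ++ [c]) = max (pvDmax l) c.2.2.2 := by
  cases l with
  | nil => exact absurd rfl hne
  | cons a t => simp [pvDmax, List.foldl_append]

theorem pvG_singleton (c : String × String × String × Int) :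
    pvG [c] = (c.2.2.2, [pvStrip c]) := by
  simp [pvG, pvDmax, List.filter]

theorem pvG_append_gt (l : List (String × String × String × Int)) (hne : l ≠ [])
    (c : String × String × String × Int) (h : pvDmax l < c.2.2.2) :
    pvG (l ++ [c]) = (c.2.2.2, [pvStrip c]) := by
  have hm : pvDmax (l ++ [c]) = c.2.2.2 := by rw [pv_dmax_append l hne c]; omega
  have hfil : l.filter (fun x => x.2.2.2 == c.2.2.2) = [] := by
    apply List.filter_eq_nil_iff.mpr
    intro x hx
    have h1 := pv_le_pvDmax l x hx
    simp only [beq_iff_eq]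
    omega
  simp only [pvG, hm, List.filter_append, hfil, List.nil_append]
  simp

theorem pvG_append_eq (l : List (String × String × String × Int)) (hne : l ≠ [])
    (c : String × String × String × Int) (h : c.2.2.2 = pvDmax l) :
    pvG (l ++ [c]) = (pvDmax l, (pvG l).2 ++ [pvStrip c]) := by
  have hm : pvDmax (l ++ [c]) = pvDmax l := by rw [pv_dmax_append l hne c]; omega
  simp [pvG, List.filter_append, hm, h]

theorem pvG_append_lt (l : List (String × String × String × Int)) (hne : l ≠ [])
    (c : String × String × String × Int) (h : c.2.2.2 < pvDmax l) :
    pvG (l ++ [c]) = pvG l := by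
  have hm : pvDmax (l ++ [c]) = pvDmax l := by rw [pv_dmax_append l hne c]; omega
  have hc : (c.2.2.2 == pvDmax l) = false := by simp only [beq_eq_false_iff_ne]; omega
  simp [pvG, List.filter_append, hm, hc]

-- lookups through the pvKG-mapped items list
theorem pv_get_map (em : PySem.Dict String (List (String × String × String × Int)))
    (b : PySem.Dict String (Int × List (String × String × String)))
    (hitems : b.items = em.items.map pvKG) (k : String) :
    b.get? k = (em.get? k).map pvG := by
  simp only [PySem.Dict.get?, hitems, List.find?_map]
  have : (fun p => p.1 == k) ∘ pvKG = (fun (p : String × List (String × String × String × Int)) => p.1 == k) := by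
    funext p; simp [pvKG]
  rw [this, Option.map_map, Option.map_map]
  rfl

theorem pv_contains_map (em : PySem.Dict String (List (String × String × String × Int)))
    (b : PySem.Dict String (Int × List (String × String × String)))
    (hitems : b.items = em.items.map pvKG) (k : String) :
    b.contains k = em.contains k := by
  simp only [PySem.Dict.contains, hitems, List.any_map]
  rfl

theorem pv_inv_step (em : PySem.Dict String (List (String × String × String × Int)))
    (b : PySem.Dict String (Int × List (String × String × String)))
    (h : pvInv em b) (depth : Int) (semantic cluster entity : String) :
    pvInv (pvStepA em depth semantic cluster entity) (pvStepB b depth semantic cluster entity) := by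
  obtain ⟨hitems, hnodup, hne⟩ := h
  set n := normalize_entity entity with hn
  have hget := pv_get_map em b hitems n
  have hcont := pv_contains_map em b hitems n
  have hknodup : (pvStepA em depth semantic cluster entity).keys.Nodup := by
    simp only [pvStepA]
    exact PySem.Dict.nodup_keys_insert _ _ _ hnodup
  cases hem : em.get? n with
  | none =>
    -- fresh key: both sides append
    have hbc : em.contains n = false := by
      rw [PySem.Dict.contains_eq_isSome_get?, hem]; rfl
    have hgetD : em.getD n [] = [] := by simp [PySem.Dict.getD, hem]
    have hb : b.get? n = none := by rw [hget, hem]; rfl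
    have hAitems : (pvStepA em depth semantic cluster entity).items
        = em.items ++ [(n, [(entity, semantic, cluster, depth)])] := by
      simp only [pvStepA, ← hn, hgetD, List.nil_append]
      exact PySem.Dict.items_insert_of_not_contains _ _ hbc
    have hBitems : (pvStepB b depth semantic cluster entity).items
        = b.items ++ [(n, (depth, [(entity, semantic, cluster)]))] := by
      simp only [pvStepB, ← hn, hb]
      exact PySem.Dict.items_insert_of_not_contains _ _ (by rw [hcont]; exact hbc)
    refine ⟨?_, hknodup, ?_⟩
    · rw [hBitems, hAitems, List.map_append, hitems]
      have hGS := pvG_singleton (entity, semantic, cluster, depth)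
      simp only [List.map_cons, List.map_nil, pvKG, hGS, pvStrip]
    · intro p hp
      rw [hAitems] at hp
      rcases List.mem_append.mp hp with hp | hp
      · exact hne p hp
      · simp only [List.mem_singleton] at hp; subst hp; simp
  | some l =>
    have hbc : em.contains n = true := by
      rw [PySem.Dict.contains_eq_isSome_get?, hem]; rfl
    have hgetD : em.getD n [] = l := by simp [PySem.Dict.getD, hem]
    have hlne : l ≠ [] := hne _ (PySem.Dict.mem_items_of_get?_eq_some em hem)
    have hb : b.get? n = some (pvG l) := by rw [hget, hem]; rfl
    have hAitems : (pvStepA em depth semantic cluster entity).items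
        = em.items.map (fun p => if (p.1 == n) = true then (n, l ++ [(entity, semantic, cluster, depth)]) else p) := by
      simp only [pvStepA, ← hn, hgetD]
      exact PySem.Dict.items_insert_of_contains _ _ hbc
    have huniq : ∀ p ∈ em.items, (p.1 == n) = true → p.2 = l := by
      intro p hp hpn
      have hpn' : p.1 = n := by simpa using hpn
      have hmem : (p.1, p.2) ∈ em.items := hp
      have : em.get? p.1 = some p.2 :=
        (PySem.Dict.get?_eq_some_iff_mem_items em p.1 p.2 hnodup).mpr hmem
      rw [hpn', hem] at this
      exact (Option.some_inj.mp this).symm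
    have hAne : ∀ p ∈ (pvStepA em depth semantic cluster entity).items, p.2 ≠ [] := by
      intro p hp
      rw [hAitems] at hp
      rcases List.mem_map.mp hp with ⟨q, hq, hqp⟩
      by_cases hqn : (q.1 == n) = true
      · rw [if_pos hqn] at hqp; subst hqp; simp
      · rw [if_neg hqn] at hqp; subst hqp; exact hne q hq
    by_cases hgt : pvDmax l < depth
    · have hBit : (pvStepB b depth semantic cluster entity).items
          = b.items.map (fun q => if (q.1 == n) = true then (n, (depth, [(entity, semantic, cluster)])) else q) := by
        simp only [pvStepB, ← hn, hb]
        rw [if_pos (by simpa using hgt)]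
        exact PySem.Dict.items_insert_of_contains _ _ (by rw [hcont]; exact hbc)
      refine ⟨?_, hknodup, hAne⟩
      rw [hBit, hitems, hAitems, List.map_map, List.map_map]
      apply List.map_congr_left
      intro p hp
      by_cases hpn : (p.1 == n) = true
      · have hG : pvG (l ++ [(entity, semantic, cluster, depth)]) = (depth, [(entity, semantic, cluster)]) :=
          pvG_append_gt l hlne (entity, semantic, cluster, depth) hgt
        simp only [Function.comp, pvKG, hpn, if_pos, hG]
      · simp [Function.comp, pvKG, hpn]
    · by_cases heq : depth = pvDmax l
      · have hBit : (pvStepB b depth semantic cluster entity).items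
            = b.items.map (fun q => if (q.1 == n) = true then (n, (pvDmax l, (pvG l).2 ++ [(entity, semantic, cluster)])) else q) := by
          simp only [pvStepB, ← hn, hb]
          rw [if_neg (by simpa using hgt), if_pos (by simpa using heq)]
          exact PySem.Dict.items_insert_of_contains _ _ (by rw [hcont]; exact hbc)
        refine ⟨?_, hknodup, hAne⟩
        rw [hBit, hitems, hAitems, List.map_map, List.map_map]
        apply List.map_congr_left
        intro p hp
        by_cases hpn : (p.1 == n) = true
        · have hG : pvG (l ++ [(entity, semantic, cluster, depth)])
              = (pvDmax l, (pvG l).2 ++ [(entity, semantic, cluster)]) :=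
            pvG_append_eq l hlne (entity, semantic, cluster, depth) heq
          simp only [Function.comp, pvKG, hpn, if_pos, hG]
        · simp [Function.comp, pvKG, hpn]
      · have hlt : ((entity, semantic, cluster, depth) :
            String × String × String × Int).2.2.2 < pvDmax l := by
          show depth < pvDmax l
          omega
        have hBit : pvStepB b depth semantic cluster entity = b := by
          simp only [pvStepB, ← hn, hb]
          rw [if_neg (by simpa using hgt), if_neg (by simpa using heq)]
        refine ⟨?_, hknodup, hAne⟩
        rw [hBit, hitems, hAitems, List.map_map]
        apply List.map_congr_left
        intro p hp
        by_cases hpn : (p.1 == n) = true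
        · have hpl := huniq p hp hpn
          have hp1 : p.1 = n := by simpa using hpn
          have hG : pvG (l ++ [(entity, semantic, cluster, depth)]) = pvG l :=
            pvG_append_lt l hlne (entity, semantic, cluster, depth) hlt
          simp only [Function.comp, pvKG, hpn, if_pos, hG]
          rw [← hpl, ← hp1]
        · simp [Function.comp, pvKG, hpn]

theorem pv_foldl_inv {α : Type}
    (fA : PySem.Dict String (List (String × String × String × Int)) → α → PySem.Dict String (List (String × String × String × Int)))
    (fB : PySem.Dict String (Int × List (String × String × String)) → α → PySem.Dict String (Int × List (String × String × String)))
    (hstep : ∀ em b x, pvInv em b → pvInv (fA em x) (fB b x)) :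
    ∀ (xs : List α) em b, pvInv em b → pvInv (xs.foldl fA em) (xs.foldl fB b) := by
  intro xs
  induction xs with
  | nil => intro em b h; exact h
  | cons x t ih => intro em b h; exact ih _ _ (hstep em b x h)

theorem pv_inv_build (extracted_entities : List (String × List (String × List String)))
    (hierarchy_tree : List (String × List (String × Int))) :
    pvInv (extracted_entities.foldl (fun em cl =>
        cl.2.foldl (fun em te =>
          let depth := pvDepthOf hierarchy_tree cl.1 te.1
          te.2.foldl (fun em e => pvStepA em depth te.1 cl.1 e) em) em) PySem.Dict.empty)
      (extracted_entities.foldl (fun b cl =>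
        cl.2.foldl (fun b te =>
          let depth := pvDepthOf hierarchy_tree cl.1 te.1
          te.2.foldl (fun b e => pvStepB b depth te.1 cl.1 e) b) b) PySem.Dict.empty) := by
  apply pv_foldl_inv
  · intro em b cl hinv
    apply pv_foldl_inv
    · intro em b te hinv
      apply pv_foldl_inv
      · intro em b e hinv
        exact pv_inv_step em b hinv _ _ _ _
      · exact hinv
    · exact hinv
  · exact ⟨rfl, List.nodup_nil, by intro p hp; cases hp⟩

theorem pv_maxA (l : List (String × String × String × Int)) (hne : l ≠ []) :
    (PySem.List.max? (l.map (fun t => t.2.2.2)) (fun x => x)).getD 0 = pvDmax l := by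
  cases l with
  | nil => exact absurd rfl hne
  | cons a t =>
    rw [List.map_cons, PySem.List.max?_id_cons]
    simp only [Option.getD_some, pvDmax, List.foldl_map]

-- A's selected/emitted candidate list per entity = the max-depth candidates, in insertion order
theorem pv_sel_eq (l : List (String × String × String × Int)) (hne : l ≠ []) :
    (match pvBestA l with
      | some t => [t]
      | none => l.filter (fun c => c.2.2.2 == (PySem.List.max? (l.map (fun t => t.2.2.2)) (fun x => x)).getD 0)) =
    l.filter (fun c => c.2.2.2 == pvDmax l) := by
  by_cases hlen : (l.length == 1) = true
  · -- singleton
    have : ∃ a, l = [a] := by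
      cases l with
      | nil => cases hne rfl
      | cons a t =>
        cases t with
        | nil => exact ⟨a, rfl⟩
        | cons b t => simp at hlen
    obtain ⟨a, rfl⟩ := this
    simp [pvBestA, pvDmax, List.filter]
  · have hsort := PySem.List.sorted_perm l (fun t => t.2.2.2) true
    cases hsrt : PySem.List.sorted l (fun t => t.2.2.2) true with
    | nil =>
      exact absurd ((PySem.List.sorted_eq_nil_iff _ _ _).mp hsrt) hne
    | cons m tl =>
      have hhead := PySem.List.key_head_sorted_rev_ge (xs := l) (key := fun t => t.2.2.2) hsrt
      have hmem : m ∈ l := by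
        rw [hsrt] at hsort
        exact hsort.mem_iff.mp (List.mem_cons_self ..)
      have hmax : m.2.2.2 = pvDmax l := by
        apply le_antisymm (pv_le_pvDmax l m hmem)
        obtain ⟨x, hx, hxe⟩ := pv_dmax_attained l hne
        rw [← hxe]
        exact hhead x hx
      have hfilperm : ((m :: tl).filter (fun t => t.2.2.2 == m.2.2.2)).Perm
          (l.filter (fun t => t.2.2.2 == m.2.2.2)) := by
        rw [← hsrt]
        exact (PySem.List.sorted_perm l (fun t => t.2.2.2) true).filter _
      simp only [pvBestA, hlen, if_false, hsrt, Bool.false_eq_true]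
      simp only [List.head?_cons, Option.map_some, Option.getD_some]
      by_cases hone : (((m :: tl).filter (fun t => t.2.2.2 == m.2.2.2)).length == 1) = true
      · have hex : ∃ a, (m :: tl).filter (fun t => t.2.2.2 == m.2.2.2) = [a] := by
          cases hF : (m :: tl).filter (fun t => t.2.2.2 == m.2.2.2) with
          | nil => rw [hF] at hone; simp at hone
          | cons a t =>
            cases t with
            | nil => exact ⟨a, rfl⟩
            | cons b t => rw [hF] at hone; simp at hone
        obtain ⟨a, hFa⟩ := hex
        rw [hFa] at hfilperm
        have hfl : l.filter (fun t => t.2.2.2 == m.2.2.2) = [a] :=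
          List.perm_singleton.mp hfilperm.symm
        rw [← hmax]
        simp only [hFa, hfl]
        simp
      · simp only [hone, Bool.false_eq_true, if_false]
        rw [pv_maxA l hne]

-- ===== VERDICT (by name: the statement is the Claim_ definition above) =====
theorem filter_entities_by_hierarchy_spec : Claim_equal_filter_entities_by_hierarchy := by
  intro extracted_entities hierarchy_tree _hdom
  unfold Spec_filter_entities_by_hierarchy
  unfold filter_entities_by_hierarchy filter_entities_by_hierarchy_alt
  obtain ⟨hitems, hnodup, hne⟩ := pv_inv_build extracted_entities hierarchy_tree
  set em := extracted_entities.foldl (fun em cl =>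
      cl.2.foldl (fun em te =>
        let depth := pvDepthOf hierarchy_tree cl.1 te.1
        te.2.foldl (fun em e => pvStepA em depth te.1 cl.1 e) em) em) PySem.Dict.empty with hemdef
  set bb := extracted_entities.foldl (fun b cl =>
      cl.2.foldl (fun b te =>
        let depth := pvDepthOf hierarchy_tree cl.1 te.1
        te.2.foldl (fun b e => pvStepB b depth te.1 cl.1 e) b) b) PySem.Dict.empty with hbbdef
  simp only []
  congr 1
  -- best_semantic_types has exactly em's keys with pvBestA of em's values
  have hbest : ((em.items.foldl (fun b p => b.insert p.1 (pvBestA p.2)) PySem.Dict.empty)).items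
      = em.items.map (fun p => (p.1, pvBestA p.2)) := by
    rw [PySem.Dict.items_foldl_insert_fresh]
    · rfl
    · intro a _; rfl
    · exact hnodup
  rw [hbest, hitems, List.foldl_map, List.foldl_map]
  congr 1
  apply PySem.List.foldl_congr_mem
  intro acc p hp
  dsimp only
  have hpne := hne p hp
  have hgetD : em.getD p.1 [] = p.2 :=
    PySem.Dict.getD_of_mem_items em hp hnodup []
  rw [hgetD]
  have hsel := pv_sel_eq p.2 hpne
  rcases hB : pvBestA p.2 with _ | t <;> simp only [hB] at hsel ⊢
  · rw [hsel]
    simp only [pvKG, pvG]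
    rw [List.foldl_map]
    rfl
  · simp only [pvKG, pvG, ← hsel, List.map_cons, List.map_nil, List.foldl_cons, List.foldl_nil]
    rfl
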